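-- pv_equiv track=rewrite | github.com/TheLoneWanderer4/Dev-Projects | test.py | get_most_used
-- ===== SOURCE A (Python) =====
-- def get_most_used(counts, min_len, max_len):
--     ''' Get the most used word.
--     min_len: An int. The min length of the word.
--     max_len: An int. The max length of the word. '''
--     most = ''
--     count = 0
--     for k,v in counts.items():
--         if v > count and len(k) >= min_len and len(k) <= max_len:
--             most = k
--             count = v
--     return most, count
-- ===== SOURCE B (Python) =====
-- def get_most_used(counts, min_len, max_len):
--     ''' Get the most used word.
--     min_len: An int. The min length of the word.
--     max_len: An int. The max length of the word. '''
--     vals = [v for k, v in counts.items() if min_len <= len(k) <= max_len]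
--     best = max(vals, default=0)
--     if best <= 0:
--         return '', 0
--     return next(((k, v) for k, v in counts.items()
--                  if v == best and min_len <= len(k) <= max_len),
--                 ('', 0))
-- ===== Notes on version B (the rewrite author's own statement) =====
-- stated objective: alternative
-- what changed: A's single pass tracking a running (most, count) pair is replaced by two differently shaped passes: max(values within the length bounds, default=0) to get the best count, then a first-match scan for the entry attaining it.
import Mathlib
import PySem

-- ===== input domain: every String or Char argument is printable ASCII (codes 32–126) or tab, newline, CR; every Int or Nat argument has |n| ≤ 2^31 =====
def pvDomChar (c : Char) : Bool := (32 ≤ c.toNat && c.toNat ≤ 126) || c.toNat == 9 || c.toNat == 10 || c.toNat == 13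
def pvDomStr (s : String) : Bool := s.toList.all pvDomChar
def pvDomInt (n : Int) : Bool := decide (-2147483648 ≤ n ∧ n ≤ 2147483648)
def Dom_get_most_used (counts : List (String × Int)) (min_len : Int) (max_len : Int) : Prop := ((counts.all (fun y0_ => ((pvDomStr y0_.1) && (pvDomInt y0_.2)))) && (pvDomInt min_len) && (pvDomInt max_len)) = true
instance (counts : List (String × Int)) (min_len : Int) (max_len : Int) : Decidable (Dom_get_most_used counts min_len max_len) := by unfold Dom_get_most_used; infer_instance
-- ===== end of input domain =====

-- B replaces A's single running-(most,count) pass by two shaped passes: collect the in-bounds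
-- values and take max(vals, default=0), then scan for the first entry attaining that positive best.
-- ===== PORT A =====
def get_most_used (counts : List (String × Int)) (min_len : Int) (max_len : Int) : String × Int :=
  counts.foldl (fun acc kv =>
    if kv.2 > acc.2 ∧ PySem.Str.len kv.1 ≥ min_len ∧ PySem.Str.len kv.1 ≤ max_len then
      (kv.1, kv.2)
    else acc) ("", 0)

-- ===== PORT B =====
-- min_len <= len(k) <= max_len  (Python's chained comparison)
def pvOkLen (min_len : Int) (max_len : Int) (k : String) : Bool :=
  decide (min_len ≤ PySem.Str.len k) && decide (PySem.Str.len k ≤ max_len)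

def get_most_used_alt (counts : List (String × Int)) (min_len : Int) (max_len : Int) : String × Int :=
  let vals := (counts.filter (fun kv => pvOkLen min_len max_len kv.1)).map (fun kv => kv.2)
  let best := PySem.List.maxD vals (fun v => v) 0      -- max(vals, default=0)
  if best ≤ 0 then ("", 0)
  else
    -- next(..., ('', 0)): first entry with v == best inside the bounds
    (counts.find? (fun kv => kv.2 == best && pvOkLen min_len max_len kv.1)).getD ("", 0)

-- ===== PRECONDITION & SPEC =====
def Spec_get_most_used (counts : List (String × Int)) (min_len : Int) (max_len : Int) (out : String × Int) : Prop := out = get_most_used_alt counts min_len max_len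
instance (counts : List (String × Int)) (min_len : Int) (max_len : Int) (out : String × Int) : Decidable (Spec_get_most_used counts min_len max_len out) := by unfold Spec_get_most_used; infer_instance

-- ===== CLAIM (what is proved, stated in full; the proofs are below) =====
def Claim_equal_get_most_used : Prop := ∀ (counts : List (String × Int)) (min_len : Int) (max_len : Int), Dom_get_most_used counts min_len max_len → Spec_get_most_used counts min_len max_len (get_most_used counts min_len max_len)

-- ===== LEMMAS AND PROOFS =====

-- running best value of A's loop, started at c
def pvBest (ml mx c : Int) (xs : List (String × Int)) : Int :=
  xs.foldl (fun a kv => if pvOkLen ml mx kv.1 then max a kv.2 else a) c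

lemma pvBest_nil (ml mx c : Int) : pvBest ml mx c [] = c := rfl

lemma pvBest_cons (ml mx c : Int) (x : String × Int) (xs : List (String × Int)) :
    pvBest ml mx c (x :: xs) = pvBest ml mx (if pvOkLen ml mx x.1 then max c x.2 else c) xs := by
  by_cases h : pvOkLen ml mx x.1 <;> simp [pvBest, List.foldl_cons, h]

lemma pvBest_le (ml mx c : Int) (xs : List (String × Int)) : c ≤ pvBest ml mx c xs := by
  induction xs generalizing c with
  | nil => simp [pvBest_nil]
  | cons x xs ih =>
    rw [pvBest_cons]
    split
    · exact le_trans (le_max_left _ _) (ih _)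
    · exact ih _

lemma pvBest_mem (ml mx c : Int) (xs : List (String × Int)) (h : c < pvBest ml mx c xs) :
    ∃ kv ∈ xs, pvOkLen ml mx kv.1 = true ∧ kv.2 = pvBest ml mx c xs := by
  induction xs generalizing c with
  | nil => simp [pvBest_nil] at h
  | cons x xs ih =>
    rw [pvBest_cons] at h ⊢
    by_cases hx : pvOkLen ml mx x.1
    · rw [if_pos hx] at h ⊢
      by_cases h2 : max c x.2 < pvBest ml mx (max c x.2) xs
      · obtain ⟨kv, hm, hok, hv⟩ := ih _ h2
        exact ⟨kv, List.mem_cons_of_mem _ hm, hok, hv⟩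
      · have hle := pvBest_le ml mx (max c x.2) xs
        have : pvBest ml mx (max c x.2) xs = max c x.2 := by omega
        refine ⟨x, List.mem_cons_self, hx, ?_⟩
        rw [this]
        omega
    · rw [if_neg hx] at h ⊢
      obtain ⟨kv, hm, hok, hv⟩ := ih _ h
      exact ⟨kv, List.mem_cons_of_mem _ hm, hok, hv⟩

-- A's loop, characterized: if no in-bounds value beats c the state is unchanged,
-- otherwise A ends at the first entry attaining the best in-bounds value
lemma A_loop_char (ml mx : Int) (xs : List (String × Int)) : ∀ (m : String) (c : Int),
    xs.foldl (fun acc kv =>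
      if kv.2 > acc.2 ∧ PySem.Str.len kv.1 ≥ ml ∧ PySem.Str.len kv.1 ≤ mx then
        (kv.1, kv.2)
      else acc) (m, c) =
    (if pvBest ml mx c xs ≤ c then (m, c)
     else (xs.find? (fun kv => kv.2 == pvBest ml mx c xs && pvOkLen ml mx kv.1)).getD (m, c)) := by
  induction xs with
  | nil => intro m c; simp [pvBest_nil]
  | cons x xs ih =>
    intro m c
    rw [List.foldl_cons, pvBest_cons]
    by_cases hx : pvOkLen ml mx x.1
    · have hxlen : ml ≤ PySem.Str.len x.1 ∧ PySem.Str.len x.1 ≤ mx := by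
        simpa [pvOkLen] using hx
      rw [if_pos hx]
      by_cases hv : x.2 > c
      · rw [if_pos ⟨hv, hxlen.1, hxlen.2⟩]
        rw [ih x.1 x.2]
        have hmax : max c x.2 = x.2 := by omega
        rw [hmax]
        have hxb : x.2 ≤ pvBest ml mx x.2 xs := pvBest_le ml mx x.2 xs
        by_cases hbe : pvBest ml mx x.2 xs ≤ x.2
        · have hbx : pvBest ml mx x.2 xs = x.2 := le_antisymm hbe hxb
          rw [if_pos hbe, if_neg (by omega)]
          have hpred : (x.2 == pvBest ml mx x.2 xs && pvOkLen ml mx x.1) = true := by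
            simp [hbx, hx]
          have hfind : (x :: xs).find? (fun kv => kv.2 == pvBest ml mx x.2 xs && pvOkLen ml mx kv.1) = some x := by
            simp [List.find?, hpred]
          rw [hfind]
          rfl
        · rw [if_neg hbe, if_neg (by omega)]
          have hpred : (x.2 == pvBest ml mx x.2 xs && pvOkLen ml mx x.1) = false := by
            simp only [Bool.and_eq_false_iff, beq_eq_false_iff_ne, ne_eq]
            left; omega
          have hfind : (x :: xs).find? (fun kv => kv.2 == pvBest ml mx x.2 xs && pvOkLen ml mx kv.1) = xs.find? (fun kv => kv.2 == pvBest ml mx x.2 xs && pvOkLen ml mx kv.1) := by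
            simp [List.find?, hpred]
          rw [hfind]
          obtain ⟨kv, hm, hok, hveq⟩ := pvBest_mem ml mx x.2 xs (by omega)
          have hs : (xs.find? (fun kv => kv.2 == pvBest ml mx x.2 xs && pvOkLen ml mx kv.1)).isSome := by
            rw [List.find?_isSome]
            exact ⟨kv, hm, by simp [hveq, hok]⟩
          obtain ⟨r, hr⟩ := Option.isSome_iff_exists.mp hs
          rw [hr]
          rfl
      · rw [if_neg (by intro h; exact hv h.1)]
        rw [ih m c]
        have hmax : max c x.2 = c := by omega
        rw [hmax]
        by_cases hbc : pvBest ml mx c xs ≤ c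
        · rw [if_pos hbc, if_pos hbc]
        · rw [if_neg hbc, if_neg hbc]
          have hpred : (x.2 == pvBest ml mx c xs && pvOkLen ml mx x.1) = false := by
            simp only [Bool.and_eq_false_iff, beq_eq_false_iff_ne, ne_eq]
            left; omega
          have hfind : (x :: xs).find? (fun kv => kv.2 == pvBest ml mx c xs && pvOkLen ml mx kv.1) = xs.find? (fun kv => kv.2 == pvBest ml mx c xs && pvOkLen ml mx kv.1) := by
            simp [List.find?, hpred]
          rw [hfind]
    · have hxlen : ¬ (ml ≤ PySem.Str.len x.1 ∧ PySem.Str.len x.1 ≤ mx) := by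
        simpa [pvOkLen] using hx
      rw [if_neg hx]
      rw [if_neg (by intro h; exact hxlen ⟨h.2.1, h.2.2⟩)]
      rw [ih m c]
      by_cases hbc : pvBest ml mx c xs ≤ c
      · rw [if_pos hbc, if_pos hbc]
      · rw [if_neg hbc, if_neg hbc]
        have hpred : (x.2 == pvBest ml mx c xs && pvOkLen ml mx x.1) = false := by
          simp [hx]
        have hfind : (x :: xs).find? (fun kv => kv.2 == pvBest ml mx c xs && pvOkLen ml mx kv.1) = xs.find? (fun kv => kv.2 == pvBest ml mx c xs && pvOkLen ml mx kv.1) := by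
          simp [List.find?, hpred]
        rw [hfind]

theorem get_most_used_spec : Claim_equal_get_most_used := by
  unfold Claim_equal_get_most_used Spec_get_most_used
  intro counts ml mx _
  unfold get_most_used get_most_used_alt
  rw [A_loop_char]
  have hpv : pvBest ml mx 0 counts =
      ((counts.filter (fun kv => pvOkLen ml mx kv.1)).map (fun kv => kv.2)).foldl max 0 := by
    unfold pvBest
    rw [PySem.List.foldl_if_eq_foldl_filter]
    rw [List.foldl_map]
  set vals := (counts.filter (fun kv => pvOkLen ml mx kv.1)).map (fun kv => kv.2) with hvals
  simp only []
  cases hv : PySem.List.max? vals (fun v => v) with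
  | none =>
    have hnil : vals = [] := (PySem.List.max?_eq_none_iff vals (fun v => v)).mp hv
    have h0 : pvBest ml mx 0 counts = 0 := by rw [hpv, hnil]; rfl
    simp [PySem.List.maxD, hv, h0]
  | some mval =>
    have hmem : mval ∈ vals := PySem.List.max?_mem hv
    have hmax : ∀ y ∈ vals, y ≤ mval := by
      intro y hy
      simpa using PySem.List.max?_isMax hv y hy
    have hub : ∀ y ∈ vals, y ≤ vals.foldl max 0 := (PySem.List.le_foldl_max vals 0).2
    have h0le : (0 : Int) ≤ vals.foldl max 0 := (PySem.List.le_foldl_max vals 0).1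
    have hmm : vals.foldl max 0 = 0 ∨ vals.foldl max 0 ∈ vals := PySem.List.foldl_max_mem vals 0
    by_cases hb : mval ≤ 0
    · have h0 : vals.foldl max 0 = 0 := by
        rcases hmm with h | h
        · exact h
        · have := hmax _ h; omega
      have hA : pvBest ml mx 0 counts ≤ 0 := by rw [hpv, h0]
      simp [PySem.List.maxD, hv, hb, hA]
    · have hfm : vals.foldl max 0 = mval := by
        rcases hmm with h | h
        · have := hub _ hmem; omega
        · have h1 := hmax _ h
          have h2 := hub _ hmem
          omega
      have hA : pvBest ml mx 0 counts = mval := by rw [hpv, hfm]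
      rw [if_neg (by omega)]
      simp only [PySem.List.maxD, hv, Option.getD_some]
      rw [if_neg hb]
      rw [hA]
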